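-- pv_equiv track=rewrite | github.com/camjohn47/declutr_code | modules/common_funcs.py | mix_lists
-- ===== SOURCE A (Python) =====
-- def mix_lists(lists):
--     '''
--     Returns a list made by taking pairs from each list <a> and <b>.
--     '''
--
--     equal_length = lambda list_a, list_b: len(list_a) == len(list_b)
--     lists_have_equal_length = all([equal_length(list_a, lists[0]) for list_a in lists])
--
--     if not lists_have_equal_length:
--         raise ValueError(f"ERROR: Tried to mix lists with uneqal lengths = {[len(x) for x in lists]}!")
--
--     list_count = len(lists)
--     item_count = len(lists[0])
--     mixed_lists = [lists[i][j] for j in range(item_count) for i in range(list_count)]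
--     return mixed_lists
-- ===== SOURCE B (Python) =====
-- def mix_lists(lists):
--     # Row-major strided fill: preallocate the output and write each input list
--     # into its stride i::list_count, instead of generating column-by-column.
--     item_count = len(lists[0])
--     lengths = [len(x) for x in lists]
--     if any(l != item_count for l in lengths):
--         raise ValueError(f"ERROR: Tried to mix lists with uneqal lengths = {lengths}!")
--     list_count = len(lists)
--     mixed = [None] * (list_count * item_count)
--     for i, lst in enumerate(lists):
--         mixed[i::list_count] = lst
--     return mixed
-- ===== Notes on version B (the rewrite author's own statement) =====
-- stated objective: faster
-- what changed: Instead of generating the output column-by-column with a nested index comprehension, B preallocates the output list and writes each input list in one strided slice assignment mixed[i::list_count] = lst (row-major traversal, C-level bulk copies).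
-- outside the precondition, e.g. on mix_lists([]): A raises IndexError, B raises IndexError
import Mathlib
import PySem

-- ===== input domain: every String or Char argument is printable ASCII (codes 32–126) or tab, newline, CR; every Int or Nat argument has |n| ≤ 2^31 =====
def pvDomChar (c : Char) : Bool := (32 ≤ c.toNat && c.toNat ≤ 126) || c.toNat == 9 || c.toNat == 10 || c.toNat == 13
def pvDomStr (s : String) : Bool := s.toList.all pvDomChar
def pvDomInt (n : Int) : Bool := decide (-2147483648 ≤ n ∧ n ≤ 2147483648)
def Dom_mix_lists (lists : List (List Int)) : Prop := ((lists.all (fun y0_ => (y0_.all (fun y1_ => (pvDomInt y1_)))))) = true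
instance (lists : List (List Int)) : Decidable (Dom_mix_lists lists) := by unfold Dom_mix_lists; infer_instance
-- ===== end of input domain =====

-- B replaces A's column-by-column nested comprehension with a preallocated output
-- filled row-by-row via strided slice assignment; same return value (timing run measured B faster).

-- ===== PORT A =====
-- literal port of A's body; raising paths (unequal lengths, empty lists) are excluded by Pre_
def mix_lists (lists : List (List Int)) : List Int :=
  let list_count := lists.length
  let item_count := (lists.headD []).length          -- len(lists[0]); lists = [] raises, excluded by Pre_
  (List.range item_count).flatMap (fun j =>
    (List.range list_count).map (fun i => (lists.getD i []).getD j 0))  -- lists[i][j], in range under Pre_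

-- ===== PORT B =====
-- mixed = [None]*(list_count*item_count); placeholder here is 0 (every slot is
-- overwritten under Pre_). mixed[i::list_count] = lst is ported as setting each
-- strided position i + j*list_count to lst[j], which is exactly what the slice
-- assignment does when the lengths match (they do under Pre_).
def mix_lists_alt (lists : List (List Int)) : List Int :=
  let item_count := (lists.headD []).length          -- len(lists[0]); lists = [] raises, excluded by Pre_
  let list_count := lists.length
  let init : List Int := List.replicate (list_count * item_count) 0
  lists.zipIdx.foldl
    (fun mixed p =>
      p.1.zipIdx.foldl (fun m q => m.set (p.2 + q.2 * list_count) q.1) mixed)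
    init

-- ===== PRECONDITION & SPEC =====
-- Pre_ excludes exactly A's raising inputs: lists == [] (IndexError) and unequal lengths (ValueError).
def Pre_mix_lists (lists : List (List Int)) : Prop :=
  lists ≠ [] ∧ ∀ l ∈ lists, l.length = (lists.headD []).length
instance (lists : List (List Int)) : Decidable (Pre_mix_lists lists) := by
  unfold Pre_mix_lists; infer_instance
def pvWitness_mix_lists : List (List Int) := [[1, 2], [3, 4]]

def Spec_mix_lists (lists : List (List Int)) (out : List Int) : Prop := out = mix_lists_alt lists
instance (lists : List (List Int)) (out : List Int) : Decidable (Spec_mix_lists lists out) := by unfold Spec_mix_lists; infer_instance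

-- ===== CLAIM (what is proved, stated in full; the proofs are below) =====
def Claim_equal_mix_lists : Prop := ∀ (lists : List (List Int)), Dom_mix_lists lists → Pre_mix_lists lists → Spec_mix_lists lists (mix_lists lists)

-- ===== LEMMAS AND PROOFS =====

-- inner fold (one strided row write) preserves length
theorem rowFill_length (lst : List Int) (k : Nat) (m : List Int) (i count : Nat) :
    ((lst.zipIdx k).foldl (fun m q => m.set (i + q.2 * count) q.1) m).length = m.length := by
  induction lst generalizing k m with
  | nil => simp
  | cons x xs ih => simp [List.zipIdx_cons, ih]

-- inner fold leaves positions it does not write unchanged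
theorem rowFill_get_ne (lst : List Int) (k : Nat) (m : List Int) (i count : Nat) (q : Nat)
    (hq : ∀ j, j < lst.length → q ≠ i + (k + j) * count) :
    ((lst.zipIdx k).foldl (fun m q => m.set (i + q.2 * count) q.1) m)[q]? = m[q]? := by
  induction lst generalizing k m with
  | nil => simp
  | cons x xs ih =>
    simp only [List.zipIdx_cons, List.foldl_cons]
    rw [ih (k := k + 1)]
    · rw [List.getElem?_set_ne]
      have h0 : q ≠ i + k * count := by simpa using hq 0 (by simp)
      exact fun h => h0 h.symm
    · intro j hj
      rw [show k + 1 + j = k + (j + 1) from by omega]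
      exact hq (j + 1) (by simpa using Nat.succ_lt_succ hj)

-- inner fold writes lst[j] at position i + (k+j)*count
theorem rowFill_get (lst : List Int) (k : Nat) (m : List Int) (i count : Nat)
    (hc : 0 < count)
    (hlen : ∀ j, j < lst.length → i + (k + j) * count < m.length) :
    ∀ j, j < lst.length →
      ((lst.zipIdx k).foldl (fun m q => m.set (i + q.2 * count) q.1) m)[i + (k + j) * count]? = lst[j]? := by
  induction lst generalizing k m with
  | nil => intro j hj; simp at hj
  | cons x xs ih =>
    intro j hj
    simp only [List.zipIdx_cons, List.foldl_cons]
    cases j with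
    | zero =>
      rw [rowFill_get_ne]
      · have hr : i + k * count < m.length := by simpa using hlen 0 (by simp)
        simp only [Nat.add_zero]
        rw [List.getElem?_set, if_pos rfl, if_pos hr]
        simp
      · intro j' hj' heq
        have h1 : (k + 0) * count < (k + 1 + j') * count :=
          (Nat.mul_lt_mul_right hc).mpr (by omega)
        omega
    | succ j' =>
      have hx : i + (k + (j' + 1)) * count = i + ((k + 1) + j') * count := by ring_nf
      rw [hx]
      rw [ih (k := k + 1) (m := m.set (i + k * count) x)
        (hlen := by
          intro t ht
          rw [List.length_set, show k + 1 + t = k + (t + 1) from by omega]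
          exact hlen (t + 1) (by simpa using Nat.succ_lt_succ ht))
        j' (by simpa using Nat.lt_of_succ_lt_succ hj)]
      simp

-- outer fold preserves length
theorem outerFill_length (rows : List (List Int)) (r : Nat) (m : List Int) (count : Nat) :
    ((rows.zipIdx r).foldl
      (fun mixed p => (p.1.zipIdx).foldl (fun m q => m.set (p.2 + q.2 * count) q.1) mixed) m).length = m.length := by
  induction rows generalizing r m with
  | nil => simp
  | cons a as ih =>
    simp only [List.zipIdx_cons, List.foldl_cons]
    rw [ih, rowFill_length]

-- outer fold leaves positions no row writes unchanged
theorem outerFill_get_ne (rows : List (List Int)) (r : Nat) (m : List Int) (count : Nat) (q : Nat)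
    (hq : ∀ idx j, idx < rows.length → j < (rows.getD idx []).length → q ≠ (r + idx) + j * count) :
    ((rows.zipIdx r).foldl
      (fun mixed p => (p.1.zipIdx).foldl (fun m q => m.set (p.2 + q.2 * count) q.1) mixed) m)[q]? = m[q]? := by
  induction rows generalizing r m with
  | nil => simp
  | cons a as ih =>
    simp only [List.zipIdx_cons, List.foldl_cons]
    rw [ih (r := r + 1)]
    · exact rowFill_get_ne a 0 m r count q (by
        intro j hj heq
        exact hq 0 j (by simp) (by simpa using hj) (by simpa using heq))
    · intro idx j hidx hj
      have := hq (idx + 1) j (by simpa using Nat.succ_lt_succ hidx) (by simpa using hj)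
      omega

-- outer fold writes rows[idx][j] at position (r+idx) + j*count
theorem outerFill_get (rows : List (List Int)) (r : Nat) (m : List Int) (count mI : Nat)
    (hc : 0 < count)
    (hr : r + rows.length ≤ count)
    (hrows : ∀ l ∈ rows, l.length = mI)
    (hm : m.length = count * mI) :
    ∀ idx j, idx < rows.length → j < mI →
      ((rows.zipIdx r).foldl
        (fun mixed p => (p.1.zipIdx).foldl (fun m q => m.set (p.2 + q.2 * count) q.1) mixed) m)[(r + idx) + j * count]? =
      (rows.getD idx [])[j]? := by
  induction rows generalizing r m with
  | nil => intro idx j hidx; simp at hidx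
  | cons a as ih =>
    intro idx j hidx hj
    simp only [List.zipIdx_cons, List.foldl_cons]
    have ha : a.length = mI := hrows a (by simp)
    have hrowlen : ∀ t, t < a.length → r + (0 + t) * count < m.length := by
      intro t ht
      rw [hm]
      have h1 : (0 + t) * count = t * count := by ring
      rw [h1]
      have ht' : t < mI := ha ▸ ht
      have : t * count + count ≤ mI * count := by
        calc t * count + count = (t + 1) * count := by ring
        _ ≤ mI * count := Nat.mul_le_mul_right count (by omega)
      have hrc : r < count := by simp at hr; omega
      have := Nat.mul_comm count mI
      omega
    cases idx with
    | zero =>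
      rw [outerFill_get_ne]
      · have := rowFill_get a 0 m r count hc hrowlen j (ha ▸ hj)
        simpa using this
      · intro idx' j' hidx' hj' heq
        -- positions (r+1+idx') + j'*count vs r + j*count: distinct mod count
        have hlt : r + 1 + idx' < count := by simp at hr hidx'; omega
        have hrc : r < count := by simp at hr; omega
        have e1 : r + 0 + j * count = (r + 1 + idx') + j' * count := by
          simpa using heq
        rcases Nat.lt_trichotomy j j' with h | h | h
        · have : j * count + count ≤ j' * count := by
            calc j * count + count = (j + 1) * count := by ring
            _ ≤ j' * count := Nat.mul_le_mul_right count (by omega)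
          omega
        · subst h; omega
        · have : j' * count + count ≤ j * count := by
            calc j' * count + count = (j' + 1) * count := by ring
            _ ≤ j * count := Nat.mul_le_mul_right count (by omega)
          omega
    | succ idx' =>
      have hx : (r + (idx' + 1)) + j * count = ((r + 1) + idx') + j * count := by ring_nf
      rw [hx]
      rw [ih (r := r + 1) (m := (a.zipIdx.foldl (fun m q => m.set (r + q.2 * count) q.1) m))
        (hr := by simp at hr ⊢; omega)
        (hrows := fun l hl => hrows l (by simp [hl]))
        (hm := by rw [rowFill_length]; exact hm)
        idx' j (by simpa using Nat.lt_of_succ_lt_succ hidx) hj]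
      simp

-- A's flatMap of constant-length blocks: length
theorem flat_length (mI n : Nat) (f : Nat → List Int) (hf : ∀ j, (f j).length = n) :
    ((List.range mI).flatMap f).length = mI * n := by
  induction mI with
  | zero => simp
  | succ m ih =>
    rw [List.range_succ, List.flatMap_append]
    simp [ih, hf, Nat.succ_mul]

-- A's flatMap of constant-length blocks: element at j*n + i is (f j)[i]
theorem flat_get (mI n : Nat) (f : Nat → List Int) (hf : ∀ j, (f j).length = n) :
    ∀ j i, j < mI → i < n →
      ((List.range mI).flatMap f)[j * n + i]? = (f j)[i]? := by
  induction mI with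
  | zero => intro j i hj _; omega
  | succ m ih =>
    intro j i hj hi
    rw [List.range_succ, List.flatMap_append]
    have hL : ((List.range m).flatMap f).length = m * n := flat_length m n f hf
    rcases Nat.lt_or_ge j m with h | h
    · rw [List.getElem?_append_left]
      · exact ih j i h hi
      · rw [hL]
        have : j * n + n ≤ m * n := by
          calc j * n + n = (j + 1) * n := by ring
          _ ≤ m * n := Nat.mul_le_mul_right n (by omega)
        omega
    · have hjm : j = m := by omega
      subst hjm
      rw [List.getElem?_append_right (by omega)]
      simp [hL]

-- ===== VERDICT (by name: the statement is the Claim_ definition above) =====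
theorem mix_lists_spec : Claim_equal_mix_lists := by
  intro lists _ hpre
  obtain ⟨hne, hlen⟩ := hpre
  simp only [Spec_mix_lists, mix_lists, mix_lists_alt]
  set n := lists.length with hn
  set mI := (lists.headD []).length with hmI
  have hc : 0 < n := by cases lists with | nil => exact absurd rfl hne | cons a as => simp [hn]
  have hf : ∀ j, ((List.range n).map (fun i => (lists.getD i []).getD j 0)).length = n := by
    intro j; simp
  apply List.ext_getElem?
  intro q
  have hAlen : ((List.range mI).flatMap (fun j => (List.range n).map (fun i => (lists.getD i []).getD j 0))).length = mI * n :=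
    flat_length mI n _ hf
  have hBlen : ((lists.zipIdx 0).foldl
      (fun mixed p => (p.1.zipIdx).foldl (fun m q => m.set (p.2 + q.2 * n) q.1) mixed)
      (List.replicate (n * mI) 0)).length = n * mI := by
    rw [outerFill_length]; simp
  rcases Nat.lt_or_ge q (n * mI) with hq | hq
  · -- decompose q = i + j*n with i < n, j < mI
    have hi : q % n < n := Nat.mod_lt _ hc
    have hj : q / n < mI := Nat.div_lt_iff_lt_mul hc |>.mpr (Nat.mul_comm n mI ▸ hq)
    have hdec : q = (q / n) * n + q % n := by
      have h1 := Nat.div_add_mod q n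
      rw [Nat.mul_comm (q / n) n]; omega
    have hA := flat_get mI n _ hf (q / n) (q % n) hj hi
    have hB := outerFill_get lists 0 (List.replicate (n * mI) 0) n mI hc
      (by simp [hn]) (fun l hl => hlen l hl) (by simp) (q % n) (q / n) (by omega) hj
    have hq2 : (0 + q % n) + (q / n) * n = q := by omega
    rw [hq2] at hB
    have hrow : (lists.getD (q % n) []) = lists[q % n]'(by omega) := by
      rw [List.getD_eq_getElem?_getD, List.getElem?_eq_getElem (by omega)]; rfl
    have hrlen : (lists[q % n]'(by omega) : List Int).length = mI :=
      hlen _ (List.getElem_mem _)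
    conv_lhs => rw [hdec]
    rw [hA, hB]
    -- LHS: ((range n).map ...)[q%n]? ; RHS: lists[q%n][q/n]?
    rw [List.getElem?_map, List.getElem?_range (by omega)]
    simp only [Option.map_some]
    rw [hrow]
    rw [List.getElem?_eq_getElem (by omega)]
    congr 1
    rw [List.getD_eq_getElem?_getD, List.getElem?_eq_getElem (by rw [hrlen]; omega)]
    rfl
  · have hq' : mI * n ≤ q := by rw [Nat.mul_comm mI n]; exact hq
    rw [List.getElem?_eq_none (by omega), List.getElem?_eq_none (by omega)]
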